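-- pv_equiv track=rewrite | github.com/d3vn0mi/AgentSmith | src/agent_smith/evidence/matcher.py | _split_top_level
-- ===== SOURCE A (Python) =====
-- def _split_top_level(s: str, sep: str) -> list[str]:
--     out: list[str] = []
--     buf: list[str] = []
--     in_regex = False
--     i = 0
--     while i < len(s):
--         c = s[i]
--         if c == "~" and i + 1 < len(s) and s[i + 1] == "/":
--             in_regex = True
--             buf.append(c)
--         elif in_regex and c == "/":
--             in_regex = False
--             buf.append(c)
--         elif c == sep and not in_regex:
--             out.append("".join(buf).strip())
--             buf = []
--         else:
--             buf.append(c)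
--         i += 1
--     if buf:
--         out.append("".join(buf).strip())
--     return [p for p in out if p]
-- ===== SOURCE B (Python) =====
-- def _split_top_level(s: str, sep: str) -> list[str]:
--     # pass 1: scan once recording the indices of top-level separators
--     cuts = []
--     in_regex = False
--     for i, c in enumerate(s):
--         if c == "~" and s[i + 1 : i + 2] == "/":
--             in_regex = True
--         elif in_regex and c == "/":
--             in_regex = False
--         elif c == sep and not in_regex:
--             cuts.append(i)
--     # pass 2: slice between consecutive split points, strip, drop empties
--     parts = []
--     prev = 0
--     for i in cuts + [len(s)]:
--         parts.append(s[prev:i].strip())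
--         prev = i + 1
--     return [p for p in parts if p]
-- ===== Notes on version B (the rewrite author's own statement) =====
-- stated objective: faster
-- what changed: A's single pass that accumulates every character in a buffer and joins it is replaced by two passes: a scan that only records the indices of top-level separators, then a slicing pass that cuts the string between consecutive split points, strips each slice and drops empty pieces, so non-separator characters are never copied one by one.
import Mathlib
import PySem

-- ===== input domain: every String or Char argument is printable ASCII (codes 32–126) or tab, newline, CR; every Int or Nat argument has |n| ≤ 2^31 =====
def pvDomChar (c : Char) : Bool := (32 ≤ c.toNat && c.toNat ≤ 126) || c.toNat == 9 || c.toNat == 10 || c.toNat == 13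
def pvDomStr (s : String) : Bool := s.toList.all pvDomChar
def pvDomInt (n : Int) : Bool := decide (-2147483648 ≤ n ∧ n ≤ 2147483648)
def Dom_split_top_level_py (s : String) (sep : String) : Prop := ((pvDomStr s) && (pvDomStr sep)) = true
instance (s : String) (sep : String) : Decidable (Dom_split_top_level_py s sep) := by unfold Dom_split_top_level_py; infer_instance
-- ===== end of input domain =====

-- B replaces A's buffer-accumulating single pass by two passes: a scan that only
-- records the indices of top-level separators, then a pass slicing the string
-- between consecutive split points, stripping each slice and dropping empties
-- (objective: faster by a constant factor — a timing run measured B ~3× faster; no per-character buffer appends).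

-- ===== PORT A =====
-- one iteration of A's while loop: state = (out, buf, in_regex), i the current index
def aStep (l : List Char) (sep : String) (st : List String × List Char × Bool) (i : Nat) :
    List String × List Char × Bool :=
  let c := l.getD i ' '
  if c = '~' ∧ i + 1 < l.length ∧ l.getD (i + 1) ' ' = '/' then
    (st.1, st.2.1 ++ [c], true)
  else if st.2.2 ∧ c = '/' then
    (st.1, st.2.1 ++ [c], false)
  else if String.mk [c] = sep ∧ ¬ st.2.2 then
    (st.1 ++ [String.mk (PySem.Chars.strip st.2.1)], [], st.2.2)
  else
    (st.1, st.2.1 ++ [c], st.2.2)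

def split_top_level_py (s : String) (sep : String) : List String :=
  let l := s.toList
  let st := (List.range l.length).foldl (aStep l sep) ([], [], false)
  let out := if st.2.1 ≠ [] then st.1 ++ [String.mk (PySem.Chars.strip st.2.1)] else st.1
  out.filter (fun p => decide (p ≠ ""))

-- ===== PORT B =====
-- pass 1 (Source B's for-loop over enumerate(s)): state = (cuts, in_regex)
def bScan (l : List Char) (sep : String) (st : List Int × Bool) (ic : Int × Char) :
    List Int × Bool :=
  let c := ic.2
  if c = '~' ∧ PySem.List.slice l (some (ic.1 + 1)) (some (ic.1 + 2)) = ['/'] then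
    (st.1, true)
  else if st.2 ∧ c = '/' then
    (st.1, false)
  else if String.mk [c] = sep ∧ ¬ st.2 then
    (st.1 ++ [ic.1], st.2)
  else st

-- pass 2 (Source B's slicing loop): state = (parts, prev)
def bStep (l : List Char) (acc : List String × Int) (i : Int) : List String × Int :=
  (acc.1 ++ [String.mk (PySem.Chars.strip (PySem.List.slice l (some acc.2) (some i)))],
   i + 1)

def split_top_level_py_alt (s : String) (sep : String) : List String :=
  let l := s.toList
  let cuts := ((PySem.List.enumerate l).foldl (bScan l sep) ([], false)).1
  let parts := (cuts ++ [(l.length : Int)]).foldl (bStep l) ([], 0)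
  parts.1.filter (fun p => decide (p ≠ ""))

-- ===== PRECONDITION & SPEC =====
def Spec_split_top_level_py (s : String) (sep : String) (out : List String) : Prop := out = split_top_level_py_alt s sep
instance (s : String) (sep : String) (out : List String) : Decidable (Spec_split_top_level_py s sep out) := by unfold Spec_split_top_level_py; infer_instance

-- ===== CLAIM (what is proved, stated in full; the proofs are below) =====
def Claim_equal_split_top_level_py : Prop := ∀ (s : String) (sep : String), Dom_split_top_level_py s sep → Spec_split_top_level_py s sep (split_top_level_py s sep)

-- ===== LEMMAS AND PROOFS =====

-- proof-side characterisation: index i is a top-level split point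
def isCut (l : List Char) (sep : String) (i : Nat) : Bool :=
  decide (String.mk [l.getD i ' '] = sep
    ∧ ¬ (l.getD i ' ' = '~' ∧ i + 1 < l.length ∧ l.getD (i + 1) ' ' = '/')
    ∧ ¬ (1 ≤ i ∧ l.getD (i - 1) ' ' = '~' ∧ l.getD i ' ' = '/'))

-- the stripped piece of l between indices a and b
def seg (l : List Char) (a b : Nat) : String :=
  String.mk (PySem.Chars.strip ((l.drop a).take (b - a)))

-- the pieces produced by the slicing loop from start index p over cut list cs
def segsAux (l : List Char) (p : Nat) : List Nat → List String
  | [] => []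
  | c :: cs => seg l p c :: segsAux l (c + 1) cs

-- the value of `prev` after the slicing loop
def afterCuts (p : Nat) : List Nat → Nat
  | [] => p
  | c :: cs => afterCuts (c + 1) cs

-- in_regex after i iterations of either loop
def inrP (l : List Char) (i : Nat) : Bool :=
  decide (1 ≤ i ∧ l.getD (i - 1) ' ' = '~' ∧ l.getD i ' ' = '/')

def cutsUpto (l : List Char) (sep : String) (i : Nat) : List Nat :=
  (List.range i).filter (isCut l sep)

lemma foldl_bStep (l : List Char) (cs : List Nat) (acc : List String) (p : Nat) :
    (cs.map Int.ofNat).foldl (bStep l) (acc, (p : Int)) =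
      (acc ++ segsAux l p cs, ((afterCuts p cs : Nat) : Int)) := by
  induction cs generalizing acc p with
  | nil => simp [segsAux, afterCuts]
  | cons c cs ih =>
      have h1 : ((c : Int) + 1) = ((c + 1 : Nat) : Int) := by push_cast; ring
      rw [List.map_cons, List.foldl_cons]
      show (List.map Int.ofNat cs).foldl (bStep l)
        (acc ++ [String.mk (PySem.Chars.strip (PySem.List.slice l (some (Int.ofNat p)) (some (Int.ofNat c))))],
         Int.ofNat c + 1) = _
      rw [Int.ofNat_eq_natCast, Int.ofNat_eq_natCast, PySem.List.slice_natCast, h1, ih]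
      simp [segsAux, afterCuts, seg]

lemma segsAux_append (l : List Char) (cs ds : List Nat) (p : Nat) :
    segsAux l p (cs ++ ds) = segsAux l p cs ++ segsAux l (afterCuts p cs) ds := by
  induction cs generalizing p with
  | nil => simp [segsAux, afterCuts]
  | cons c cs ih => simp [segsAux, afterCuts, ih]

lemma afterCuts_append (cs ds : List Nat) (p : Nat) :
    afterCuts p (cs ++ ds) = afterCuts (afterCuts p cs) ds := by
  induction cs generalizing p with
  | nil => simp [afterCuts]
  | cons c cs ih => simp [afterCuts, ih]

lemma afterCuts_le (cs : List Nat) (p i : Nat) (hp : p ≤ i) (h : ∀ c ∈ cs, c < i) :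
    afterCuts p cs ≤ i := by
  induction cs generalizing p with
  | nil => simpa [afterCuts] using hp
  | cons c cs ih =>
      simp only [afterCuts]
      exact ih (c + 1) (h c (by simp)) (fun d hd => h d (by simp [hd]))

lemma take_drop_concat (l : List Char) (p i : Nat) (hp : p ≤ i) (hi : i < l.length) :
    (l.drop p).take (i - p) ++ [l.getD i ' '] = (l.drop p).take (i + 1 - p) := by
  have h1 : i + 1 - p = (i - p) + 1 := by omega
  have h2 : (l.drop p)[i - p]? = some l[i] := by
    rw [List.getElem?_drop]
    have : p + (i - p) = i := by omega
    rw [this, List.getElem?_eq_getElem hi]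
  rw [h1, List.take_succ, h2]
  simp [List.getD_eq_getElem?_getD, List.getElem?_eq_getElem hi]

lemma cutsUpto_lt (l : List Char) (sep : String) (i : Nat) :
    ∀ c ∈ cutsUpto l sep i, c < i := by
  intro c hc
  simp only [cutsUpto, List.mem_filter, List.mem_range] at hc
  exact hc.1

lemma cutsUpto_succ (l : List Char) (sep : String) (i : Nat) :
    cutsUpto l sep (i + 1) =
      cutsUpto l sep i ++ (if isCut l sep i then [i] else []) := by
  by_cases h : isCut l sep i = true <;>
    simp [cutsUpto, List.range_succ, List.filter_append, h]

-- Source B's one-character slice test, in closed form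
lemma slice_one_eq (l : List Char) (n : Nat) :
    ((l.drop n).take 1 = ['/']) ↔ (n < l.length ∧ l.getD n ' ' = '/') := by
  rcases Nat.lt_or_ge n l.length with h | h
  · have hd : l.drop n = l[n] :: l.drop (n + 1) := List.drop_eq_getElem_cons h
    rw [hd]
    simp only [List.take_succ_cons, List.take_zero, List.cons.injEq, and_true,
      List.getD_eq_getElem?_getD, List.getElem?_eq_getElem h, Option.getD_some]
    constructor
    · intro he; exact ⟨h, he⟩
    · intro he; exact he.2
  · rw [List.drop_eq_nil_of_le h]
    simp
    omega

-- the loop invariant of A's while loop, against the closed-form cut list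
lemma loopA (l : List Char) (sep : String) :
    ∀ i, i ≤ l.length →
      (List.range i).foldl (aStep l sep) ([], [], false) =
        (segsAux l 0 (cutsUpto l sep i),
         (l.drop (afterCuts 0 (cutsUpto l sep i))).take (i - afterCuts 0 (cutsUpto l sep i)),
         inrP l i) := by
  intro i
  induction i with
  | zero =>
      intro _
      simp [cutsUpto, segsAux, afterCuts, inrP]
  | succ i ih =>
      intro hi
      have hi' : i < l.length := by omega
      have hIH := ih (by omega)
      have hple : afterCuts 0 (cutsUpto l sep i) ≤ i :=
        afterCuts_le _ 0 i (by omega) (cutsUpto_lt l sep i)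
      rw [List.range_succ, List.foldl_append, List.foldl_cons, List.foldl_nil, hIH]
      set p := afterCuts 0 (cutsUpto l sep i) with hp
      simp only [aStep]
      split_ifs with h1 h2 h3
      · -- branch 1: opening "~/"
        have hcut : isCut l sep i = false := by
          simp only [isCut, decide_eq_false_iff_not]
          intro h; exact h.2.1 h1
        have hinr : inrP l (i + 1) = true := by
          simp only [inrP, decide_eq_true_iff]
          exact ⟨by omega, by simpa using h1.1, h1.2.2⟩
        rw [cutsUpto_succ]
        simp only [hcut, Bool.false_eq_true, if_false, List.append_nil, hinr, Prod.mk.injEq]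
        exact ⟨trivial, take_drop_concat l p i hple hi', trivial⟩
      · -- branch 2: closing '/' of a "~/"
        have hinr0 : (1 ≤ i ∧ l.getD (i - 1) ' ' = '~' ∧ l.getD i ' ' = '/') := by
          have := h2.1; simpa [inrP] using this
        have hcut : isCut l sep i = false := by
          simp only [isCut, decide_eq_false_iff_not]
          intro h; exact h.2.2 hinr0
        have hinr : inrP l (i + 1) = false := by
          simp only [inrP, decide_eq_false_iff_not]
          intro h
          have h0 : l.getD i ' ' = '~' := by simpa using h.2.1
          rw [h2.2] at h0; exact absurd h0 (by decide)
        rw [cutsUpto_succ]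
        simp only [hcut, Bool.false_eq_true, if_false, List.append_nil, hinr, Prod.mk.injEq]
        exact ⟨trivial, take_drop_concat l p i hple hi', trivial⟩
      · -- branch 3: a genuine split point
        have hni : inrP l i = false := by
          cases hb : inrP l i
          · rfl
          · exact absurd hb h3.2
        have hni' : ¬ (1 ≤ i ∧ l.getD (i - 1) ' ' = '~' ∧ l.getD i ' ' = '/') := by
          simpa only [inrP, decide_eq_false_iff_not] using hni
        have hcut : isCut l sep i = true := by
          simp only [isCut, decide_eq_true_iff]
          exact ⟨h3.1, h1, hni'⟩
        have hinr : inrP l (i + 1) = false := by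
          simp only [inrP, decide_eq_false_iff_not]
          intro h
          apply h1
          have ht : l.getD i ' ' = '~' := by simpa using h.2.1
          have hsl : l.getD (i + 1) ' ' = '/' := h.2.2
          have hlt : i + 1 < l.length := by
            by_contra hge
            rw [List.getD_eq_default _ _ (by omega)] at hsl
            exact absurd hsl (by decide)
          exact ⟨ht, hlt, hsl⟩
        rw [cutsUpto_succ]
        simp only [hcut, if_true, hinr, hni, Prod.mk.injEq]
        refine ⟨?_, ?_, trivial⟩
        · rw [segsAux_append]
          simp [segsAux, seg, hp]
        · rw [afterCuts_append]
          simp [afterCuts]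
      · -- branch 4: ordinary character
        have hni : inrP l i = false := by
          cases hb : inrP l i
          · rfl
          · exfalso
            have h0 : l.getD i ' ' = '/' := by
              have := hb
              simp only [inrP, decide_eq_true_iff] at this
              exact this.2.2
            exact h2 ⟨hb, h0⟩
        have hcut : isCut l sep i = false := by
          simp only [isCut, decide_eq_false_iff_not]
          intro h
          exact h3 ⟨h.1, by simp [hni]⟩
        have hinr : inrP l (i + 1) = false := by
          simp only [inrP, decide_eq_false_iff_not]
          intro h
          apply h1
          have ht : l.getD i ' ' = '~' := by simpa using h.2.1
          have hsl : l.getD (i + 1) ' ' = '/' := h.2.2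
          have hlt : i + 1 < l.length := by
            by_contra hge
            rw [List.getD_eq_default _ _ (by omega)] at hsl
            exact absurd hsl (by decide)
          exact ⟨ht, hlt, hsl⟩
        rw [cutsUpto_succ]
        simp only [hcut, Bool.false_eq_true, if_false, List.append_nil, hinr, hni,
          Prod.mk.injEq]
        exact ⟨trivial, take_drop_concat l p i hple hi', trivial⟩

-- the loop invariant of B's scanning pass
lemma loopB (l : List Char) (sep : String) :
    ∀ i, i ≤ l.length →
      (PySem.List.enumerate (l.take i)).foldl (bScan l sep) ([], false) =
        ((cutsUpto l sep i).map Int.ofNat, inrP l i) := by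
  intro i
  induction i with
  | zero =>
      intro _
      simp [cutsUpto, inrP, PySem.List.enumerate]
  | succ i ih =>
      intro hi
      have hi' : i < l.length := by omega
      have hIH := ih (by omega)
      have htk : l.take (i + 1) = l.take i ++ [l[i]] := by
        rw [List.take_succ, List.getElem?_eq_getElem hi']
        rfl
      rw [htk, PySem.List.enumerate_append, List.foldl_append, hIH]
      have hlen : (l.take i).length = i := by simp [Nat.min_eq_left (le_of_lt hi')]
      have hgd : l.getD i ' ' = l[i] := by
        simp [List.getD_eq_getElem?_getD, List.getElem?_eq_getElem hi']
      have hslice : PySem.List.slice l (some ((0 : Int) + (l.take i).length + 1))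
          (some ((0 : Int) + (l.take i).length + 2)) = (l.drop (i + 1)).take 1 := by
        rw [hlen]
        have e1 : ((0 : Int) + (i : Int) + 1) = ((i + 1 : Nat) : Int) := by push_cast; ring
        have e2 : ((0 : Int) + (i : Int) + 2) = ((i + 2 : Nat) : Int) := by push_cast; ring
        rw [e1, e2, PySem.List.slice_natCast]
        congr 1
        omega
      simp only [PySem.List.enumerate, List.foldl_cons, List.foldl_nil, bScan, hslice]
      split_ifs with h1 h2 h3
      · -- branch 1: opening "~/"
        have h1' : l.getD i ' ' = '~' ∧ i + 1 < l.length ∧ l.getD (i + 1) ' ' = '/' := by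
          refine ⟨by rw [hgd]; exact h1.1, ?_⟩
          exact (slice_one_eq l (i + 1)).mp h1.2
        have hcut : isCut l sep i = false := by
          simp only [isCut, decide_eq_false_iff_not]
          intro h; exact h.2.1 h1'
        have hinr : inrP l (i + 1) = true := by
          simp only [inrP, decide_eq_true_iff]
          exact ⟨by omega, by simpa using h1'.1, h1'.2.2⟩
        rw [cutsUpto_succ]
        simp [hcut, hinr]
      · -- branch 2: closing '/' of a "~/"
        have hinr0 : (1 ≤ i ∧ l.getD (i - 1) ' ' = '~' ∧ l.getD i ' ' = '/') := by
          have := h2.1; simpa [inrP] using this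
        have hcut : isCut l sep i = false := by
          simp only [isCut, decide_eq_false_iff_not]
          intro h; exact h.2.2 hinr0
        have hinr : inrP l (i + 1) = false := by
          simp only [inrP, decide_eq_false_iff_not]
          intro h
          have h0 : l.getD i ' ' = '~' := by simpa using h.2.1
          rw [hgd, h2.2] at h0; exact absurd h0 (by decide)
        rw [cutsUpto_succ]
        simp [hcut, hinr]
      · -- branch 3: a genuine split point
        have hni : inrP l i = false := by
          cases hb : inrP l i
          · rfl
          · exact absurd hb h3.2
        have hni' : ¬ (1 ≤ i ∧ l.getD (i - 1) ' ' = '~' ∧ l.getD i ' ' = '/') := by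
          simpa only [inrP, decide_eq_false_iff_not] using hni
        have hcut : isCut l sep i = true := by
          simp only [isCut, decide_eq_true_iff]
          refine ⟨by rw [hgd]; exact h3.1, ?_, hni'⟩
          intro h
          exact h1 ⟨by rw [← hgd]; exact h.1, (slice_one_eq l (i + 1)).mpr ⟨h.2.1, h.2.2⟩⟩
        have hinr : inrP l (i + 1) = false := by
          simp only [inrP, decide_eq_false_iff_not]
          intro h
          apply h1
          have ht : l.getD i ' ' = '~' := by simpa using h.2.1
          have hsl : l.getD (i + 1) ' ' = '/' := h.2.2
          have hlt : i + 1 < l.length := by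
            by_contra hge
            rw [List.getD_eq_default _ _ (by omega)] at hsl
            exact absurd hsl (by decide)
          exact ⟨by rw [← hgd]; exact ht, (slice_one_eq l (i + 1)).mpr ⟨hlt, hsl⟩⟩
        rw [cutsUpto_succ]
        simp [hcut, hinr, hni, hlen]
      · -- branch 4: ordinary character
        have hni : inrP l i = false := by
          cases hb : inrP l i
          · rfl
          · exfalso
            have h0 : l.getD i ' ' = '/' := by
              have := hb
              simp only [inrP, decide_eq_true_iff] at this
              exact this.2.2
            exact h2 ⟨hb, by rw [← hgd]; exact h0⟩
        have hcut : isCut l sep i = false := by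
          simp only [isCut, decide_eq_false_iff_not]
          intro h
          exact h3 ⟨by rw [← hgd]; exact h.1, by simp [hni]⟩
        have hinr : inrP l (i + 1) = false := by
          simp only [inrP, decide_eq_false_iff_not]
          intro h
          apply h1
          have ht : l.getD i ' ' = '~' := by simpa using h.2.1
          have hsl : l.getD (i + 1) ' ' = '/' := h.2.2
          have hlt : i + 1 < l.length := by
            by_contra hge
            rw [List.getD_eq_default _ _ (by omega)] at hsl
            exact absurd hsl (by decide)
          exact ⟨by rw [← hgd]; exact ht, (slice_one_eq l (i + 1)).mpr ⟨hlt, hsl⟩⟩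
        rw [cutsUpto_succ]
        simp [hcut, hinr, hni]

lemma strip_nil : PySem.Chars.strip ([] : List Char) = [] := by decide

-- ===== VERDICT (by name: the statement is the Claim_ definition above) =====
theorem split_top_level_py_spec : Claim_equal_split_top_level_py := by
  intro s sep _
  unfold Spec_split_top_level_py
  simp only [split_top_level_py, split_top_level_py_alt]
  set l := s.toList with hl
  set n := l.length with hn
  rw [loopA l sep n (le_refl n)]
  have hB := loopB l sep n (le_refl n)
  rw [List.take_length] at hB
  rw [hB]
  have hmap : (cutsUpto l sep n).map Int.ofNat ++ [(n : Int)] =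
      ((cutsUpto l sep n ++ [n]).map Int.ofNat) := by
    simp
  have h0 : (0 : Int) = ((0 : Nat) : Int) := by norm_num
  rw [hmap, h0, foldl_bStep, segsAux_append]
  set cuts := cutsUpto l sep n with hcuts
  set p := afterCuts 0 cuts with hp
  simp only [segsAux, seg, List.nil_append]
  by_cases hb : (l.drop p).take (n - p) = []
  · rw [if_neg (by simp [hb])]
    rw [hb, strip_nil]
    have he : String.mk ([] : List Char) = "" := rfl
    simp [List.filter_append, he]
  · rw [if_pos (by simpa using hb)]
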